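-- pv_equiv track=rewrite | github.com/tiod0611/practice_language | python/coding_test/level_1/과일_장수/solution.py | solution
-- ===== SOURCE A (Python) =====
-- def solution(k, m, score):
--     sorted_score = sorted(score, reverse=True)
--     total_value = 0
--     for index in range((len(sorted_score)//m)+1):
--         box = sorted_score[index*m:(index+1)*m]
--         if len(box) <m:
--             break
--         value = min(box) * m
--         total_value += value
--
--     return total_value
-- ===== SOURCE B (Python) =====
-- def solution(k, m, score):
--     n = len(score)
--     total = 0
--     for idx, v in enumerate(sorted(score)):
--         if (n - idx) % m == 0:
--             total += v
--     return m * total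
-- ===== Notes on version B (the rewrite author's own statement) =====
-- stated objective: alternative
-- what changed: B sorts ascending once and makes a single flat enumerate pass, adding the element at each position idx with (n - idx) divisible by m (exactly the box minima) and multiplying by m once at the end - no descending sort, no per-box slicing, no min() calls, no break.
-- outside the precondition, e.g. on solution(1, -2, [3, 1, 2]): A returns 0, B returns -4; on solution(0, 0, [1]): A raises ZeroDivisionError, B raises ZeroDivisionError; on solution(0, -1, []): A raises ValueError, B returns 0
import Mathlib
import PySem

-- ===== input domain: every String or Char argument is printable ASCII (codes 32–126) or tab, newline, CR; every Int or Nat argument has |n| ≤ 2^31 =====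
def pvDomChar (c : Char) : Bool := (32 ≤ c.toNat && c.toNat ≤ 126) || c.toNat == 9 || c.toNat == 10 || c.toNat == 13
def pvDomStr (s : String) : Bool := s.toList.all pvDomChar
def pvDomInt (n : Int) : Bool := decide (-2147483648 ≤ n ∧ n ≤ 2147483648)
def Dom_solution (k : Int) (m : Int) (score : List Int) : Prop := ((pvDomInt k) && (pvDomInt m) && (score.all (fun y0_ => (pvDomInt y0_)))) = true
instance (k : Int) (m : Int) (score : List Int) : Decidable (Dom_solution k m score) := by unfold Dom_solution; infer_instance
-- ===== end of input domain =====

-- B sorts ascending once and makes one flat enumerate pass, adding the elements at the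
-- positions idx with (n - idx) divisible by m and multiplying by m at the end — no
-- descending sort, no boxes, no slicing, no min(); objective: alternative decomposition.

-- ===== PORT A =====
-- A's for-loop with its break, ported as structural recursion over the range list
def solutionLoopA (ss : List Int) (m : Int) : List Int → Int → Int
  | [], total => total
  | index :: rest, total =>
      let box := PySem.List.slice ss (some (index * m)) (some ((index + 1) * m))
      if (box.length : Int) < m then total
      else solutionLoopA ss m rest (total + ((PySem.List.min? box (fun x => x)).getD 0) * m)
      -- min([]) raises in Python; under Pre_ the box here is never empty, the .getD 0 is unreachable

def solution (k : Int) (m : Int) (score : List Int) : Int :=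
  let sorted_score := PySem.List.sorted score (fun x => x) true
  solutionLoopA sorted_score m
    (PySem.List.pyRange 0 (PySem.Int.floordiv (sorted_score.length : Int) m + 1) 1) 0

-- ===== PORT B =====
def solution_alt (k : Int) (m : Int) (score : List Int) : Int :=
  let n : Int := (score.length : Int)
  let total := (PySem.List.enumerate (PySem.List.sorted score (fun x => x) false)).foldl
      (fun acc p => if PySem.Int.mod (n - p.1) m = 0 then acc + p.2 else acc) 0
  m * total

-- ===== PRECONDITION & SPEC =====
-- Pre_ restricts to the natural domain of a box size, 0 < m: A raises ZeroDivisionError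
-- for m = 0 and ValueError (min of an empty slice) for m < 0 with empty score, and for
-- m < 0 with nonempty score A's accidental 0 (its range is empty) is not a value of the
-- task's meaning — a box of negative size is unspecified.
def Pre_solution (k : Int) (m : Int) (score : List Int) : Prop := 0 < m
instance (k : Int) (m : Int) (score : List Int) : Decidable (Pre_solution k m score) := by unfold Pre_solution; infer_instance
def pvWitness_solution : Int × Int × List Int := (4, 2, [1, 2, 3, 1])

def Spec_solution (k : Int) (m : Int) (score : List Int) (out : Int) : Prop := out = solution_alt k m score
instance (k : Int) (m : Int) (score : List Int) (out : Int) : Decidable (Spec_solution k m score out) := by unfold Spec_solution; infer_instance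

-- ===== CLAIM (what is proved, stated in full; the proofs are below) =====
def Claim_equal_solution : Prop := ∀ (k : Int) (m : Int) (score : List Int), Dom_solution k m score → Pre_solution k m score → Spec_solution k m score (solution k m score)

-- ===== LEMMAS AND PROOFS =====

-- the last element of a weakly descending list is a minimum
theorem desc_getLast_le {t : List Int} (h : t.Pairwise (fun a b => b ≤ a)) (hne : t ≠ []) :
    ∀ y ∈ t, t.getLast hne ≤ y := by
  intro y hy
  obtain ⟨i, hi, rfl⟩ := List.mem_iff_getElem.mp hy
  rw [List.getLast_eq_getElem]
  rcases Nat.lt_or_ge i (t.length - 1) with hlt | hge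
  · exact List.pairwise_iff_getElem.mp h i (t.length - 1) hi (by omega) hlt
  · have : i = t.length - 1 := by omega
    subst this; exact le_refl _

-- Python min of a weakly descending nonempty Int list is its last element
theorem min_desc {t : List Int} (h : t.Pairwise (fun a b => b ≤ a)) (hne : t ≠ []) :
    PySem.List.min? t (fun x => x) = some (t.getLast hne) := by
  cases heq : PySem.List.min? t (fun x => x) with
  | none => exact absurd ((PySem.List.min?_eq_none_iff t _).mp heq) hne
  | some mv =>
    have hmem := PySem.List.min?_mem heq
    have hmin := PySem.List.min?_isMin heq
    have h1 : mv ≤ t.getLast hne := hmin _ (List.getLast_mem hne)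
    have h2 : t.getLast hne ≤ mv := desc_getLast_le h hne mv hmem
    rw [le_antisymm h1 h2]

-- A's loop from index j to q (inclusive): adds m' * ss[(j+p)*m'+m'-1] for the d full boxes left
theorem loopA_eq (ss : List Int) (m' : Nat) (hm : 1 ≤ m')
    (hdesc : ss.Pairwise (fun a b => b ≤ a)) (d : Nat) :
    ∀ (j : Nat) (total : Int), j + d = ss.length / m' →
      solutionLoopA ss (m' : Int) (PySem.List.pyRange (j : Int) ((ss.length / m' : Nat) + 1) 1) total
        = total + (m' : Int) * ((List.range d).map (fun p => ss.getD ((j + p) * m' + m' - 1) 0)).sum := by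
  induction d with
  | zero =>
    intro j total hj
    have hj' : j = ss.length / m' := by omega
    have hjq : (j : Int) = ((ss.length / m' : Nat) : Int) := by exact_mod_cast hj'
    rw [hjq]
    rw [PySem.List.pyRange_one_singleton]
    simp only [solutionLoopA]
    have hbox : PySem.List.slice ss (some (((ss.length / m' : Nat) : Int) * (m' : Int)))
        (some ((((ss.length / m' : Nat) : Int) + 1) * (m' : Int)))
        = (ss.drop ((ss.length / m') * m')).take ((ss.length / m' + 1) * m' - (ss.length / m') * m') := by
      rw [show (((ss.length / m' : Nat) : Int) * (m' : Int)) = (((ss.length / m' * m' : Nat)) : Int) by push_cast; ring,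
          show ((((ss.length / m' : Nat) : Int) + 1) * (m' : Int)) = ((((ss.length / m' + 1) * m' : Nat)) : Int) by push_cast; ring]
      exact PySem.List.slice_natCast ss _ _
    rw [hbox]
    have hlen : ((ss.drop ((ss.length / m') * m')).take ((ss.length / m' + 1) * m' - (ss.length / m') * m')).length < m' := by
      have h1 := Nat.div_add_mod ss.length m'
      have h2 := Nat.mod_lt ss.length (show 0 < m' by omega)
      have h3 : (ss.length / m' + 1) * m' = (ss.length / m') * m' + m' := by ring
      have h4 : m' * (ss.length / m') = (ss.length / m') * m' := Nat.mul_comm _ _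
      simp only [List.length_take, List.length_drop]
      omega
    rw [if_pos (by exact_mod_cast hlen)]
    simp
  | succ d ih =>
    intro j total hj
    have hjlt : (j : Int) < ((ss.length / m' : Nat) : Int) + 1 := by
      have : j < ss.length / m' + 1 := by omega
      exact_mod_cast this
    rw [PySem.List.pyRange_one_cons hjlt]
    simp only [solutionLoopA]
    have hfull : (j + 1) * m' ≤ ss.length := by
      have h1 : j + 1 ≤ ss.length / m' := by omega
      calc (j + 1) * m' ≤ (ss.length / m') * m' := Nat.mul_le_mul_right _ h1
        _ ≤ ss.length := Nat.div_mul_le_self _ _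
    have hbox : PySem.List.slice ss (some ((j : Int) * (m' : Int)))
        (some (((j : Int) + 1) * (m' : Int)))
        = (ss.drop (j * m')).take ((j + 1) * m' - j * m') := by
      rw [show ((j : Int) * (m' : Int)) = ((j * m' : Nat) : Int) by push_cast; ring,
          show (((j : Int) + 1) * (m' : Int)) = (((j + 1) * m' : Nat) : Int) by push_cast; ring]
      exact PySem.List.slice_natCast ss _ _
    rw [hbox]
    set box := (ss.drop (j * m')).take ((j + 1) * m' - j * m') with hboxdef
    have hblen : box.length = m' := by
      simp only [hboxdef, List.length_take, List.length_drop]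
      have : (j + 1) * m' - j * m' = m' := by
        have : (j + 1) * m' = j * m' + m' := by ring
        omega
      omega
    rw [if_neg (by rw [hblen]; omega)]
    have hbne : box ≠ [] := by
      intro hnil; rw [hnil] at hblen; simp at hblen; omega
    have hbdesc : box.Pairwise (fun a b => b ≤ a) :=
      (List.Pairwise.drop hdesc).take
    rw [min_desc hbdesc hbne]
    have hidx : j * m' + m' - 1 < ss.length := by
      have : (j + 1) * m' = j * m' + m' := by ring
      omega
    have hsub : (j + 1) * m' - j * m' = m' := by
      have : (j + 1) * m' = j * m' + m' := by ring
      omega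
    have hlast : box.getLast hbne = ss.getD (j * m' + m' - 1) 0 := by
      have h4 : box.getLast? = some (box.getLast hbne) := List.getLast?_eq_some_getLast hbne
      have h5 : box.getLast? = some (ss.getD (j * m' + m' - 1) 0) := by
        rw [List.getLast?_eq_getElem?, hblen, hboxdef, hsub]
        rw [List.getElem?_take_of_lt (by omega)]
        rw [List.getElem?_drop]
        rw [List.getD_eq_getElem ss 0 hidx]
        rw [List.getElem?_eq_getElem (by omega)]
        congr 2
        omega
      rw [h4] at h5
      exact Option.some.inj h5
    rw [hlast]
    have hrange : ((j : Int) + 1) = (((j + 1 : Nat)) : Int) := by push_cast; ring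
    rw [hrange, ih (j + 1) _ (by omega)]
    rw [List.range_succ_eq_map]
    simp only [List.map_cons, List.map_map, List.sum_cons, Option.getD_some]
    have : ((List.range d).map (fun p => ss.getD ((j + 1 + p) * m' + m' - 1) 0))
         = ((List.range d).map ((fun p => ss.getD ((j + p) * m' + m' - 1) 0) ∘ (fun n => n + 1))) := by
      apply List.map_congr_left
      intro p _
      simp only [Function.comp]
      congr 2
      ring_nf
    rw [← this]
    ring_nf

-- List sum over range as a Finset sum (definitional)
theorem listSum_eq_finsetSum (n : Nat) (f : Nat → Int) :
    ((List.range n).map f).sum = ∑ p ∈ Finset.range n, f p := rfl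

-- the descending sort is the reverse of the ascending sort (Int values, identity key)
theorem sorted_rev_eq_reverse (score : List Int) :
    PySem.List.sorted score (fun x => x) true = (PySem.List.sorted score (fun x => x) false).reverse := by
  have h : (PySem.List.sorted score (fun x => x) true).reverse
      = PySem.List.sorted score (fun x => x) false := by
    apply PySem.List.eq_of_perm_of_pairwise_le_of_injective (fun x : Int => x) (fun a b h => h)
    · exact ((List.reverse_perm _).trans (PySem.List.sorted_perm score _ true)).trans
        (PySem.List.sorted_perm score _ false).symm
    · exact (List.pairwise_reverse).mpr (PySem.List.sorted_pairwise_rev score _)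
    · exact PySem.List.sorted_pairwise score _
  rw [← h, List.reverse_reverse]

-- the reflected divisibility-filtered sum picks out exactly the indices p*m+m-1, p < n/m
theorem sum_ite_dvd (F : Nat → Int) (n m : Nat) (hm : 1 ≤ m) :
    (∑ i ∈ Finset.range n, if m ∣ (i + 1) then F i else 0)
      = ∑ p ∈ Finset.range (n / m), F (p * m + m - 1) := by
  induction n with
  | zero => simp
  | succ n ih =>
    rw [Finset.sum_range_succ, ih, Nat.succ_div]
    by_cases hd : m ∣ (n + 1)
    · have hd' := hd
      obtain ⟨t, ht⟩ := hd'
      rcases t with _ | t'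
      · simp at ht
      · rw [Nat.mul_succ] at ht
        have hdiv : n / m = t' := by
          have hn : n = m * t' + (m - 1) := by omega
          rw [hn, Nat.mul_add_div (by omega), Nat.div_eq_of_lt (by omega)]
          omega
        have h1 : (n / m) * m = m * t' := by rw [hdiv, Nat.mul_comm]
        rw [if_pos hd, if_pos hd, Finset.sum_range_succ,
            show n / m * m + m - 1 = n by omega]
    · rw [if_neg hd, if_neg hd]
      simp

-- B's fold = a divisibility-filtered sum over the ascending sort
theorem foldB_eq (s : List Int) (m' : Nat) :
    (PySem.List.enumerate s).foldl
        (fun acc p => if PySem.Int.mod ((s.length : Int) - p.1) (m' : Int) = 0 then acc + p.2 else acc) 0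
      = ∑ j ∈ Finset.range s.length, if m' ∣ (s.length - j) then s.getD j 0 else 0 := by
  have hfn : (fun (acc : Int) (p : Int × Int) =>
        if PySem.Int.mod ((s.length : Int) - p.1) (m' : Int) = 0 then acc + p.2 else acc)
      = (fun acc p => acc + (if PySem.Int.mod ((s.length : Int) - p.1) (m' : Int) = 0 then p.2 else 0)) := by
    funext acc p; split <;> simp
  have hlen0 : PySem.List.len s = ((s.length : Nat) : Int) := rfl
  rw [hfn, PySem.List.foldl_add, PySem.List.enumerate_eq_map_pyRange s 0, hlen0,
      PySem.List.pyRange_zero_natCast, List.map_map, List.map_map]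
  have hmaps : ∀ j ∈ List.range s.length,
      (((fun p : Int × Int => if PySem.Int.mod ((s.length : Int) - p.1) (m' : Int) = 0 then p.2 else 0)
        ∘ (fun j : Int => (j, PySem.List.pyGetD s j 0))) ∘ (fun k : Nat => (k : Int))) j
      = (fun j : Nat => if m' ∣ (s.length - j) then s.getD j 0 else 0) j := by
    intro j hj
    have hjn : j < s.length := List.mem_range.mp hj
    simp only [Function.comp]
    have hc : ((s.length : Int) - (j : Int)) = (((s.length - j : Nat)) : Int) := by
      push_cast [Nat.cast_sub (by omega : j ≤ s.length)]; ring
    rw [hc, PySem.Int.mod_natCast, PySem.List.pyGetD_natCast]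
    by_cases hd : m' ∣ (s.length - j)
    · have h0 : (s.length - j) % m' = 0 := by
        obtain ⟨c, hc2⟩ := hd; simp [hc2, Nat.mul_mod_right]
      rw [if_pos (by exact_mod_cast h0), if_pos hd]
    · rw [if_neg (fun hcon => hd (Nat.dvd_of_mod_eq_zero (by exact_mod_cast hcon))), if_neg hd]
  rw [List.map_congr_left hmaps, zero_add, listSum_eq_finsetSum]

theorem solution_eq (k m : Int) (score : List Int) (hp : Pre_solution k m score) :
    solution k m score = solution_alt k m score := by
  have hpos : 0 < m := hp
  obtain ⟨m', rfl⟩ : ∃ m' : Nat, m = (m' : Int) := ⟨m.toNat, (Int.toNat_of_nonneg (by omega)).symm⟩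
  have hm1 : 1 ≤ m' := by exact_mod_cast hpos
  unfold solution solution_alt
  dsimp only
  set sd := PySem.List.sorted score (fun x => x) true with hsd
  set sa := PySem.List.sorted score (fun x => x) false with hsa
  have hdesc : sd.Pairwise (fun a b => b ≤ a) := PySem.List.sorted_pairwise_rev score _
  have hrev : sd = sa.reverse := sorted_rev_eq_reverse score
  have hlen : sd.length = sa.length := by rw [hrev, List.length_reverse]
  have hlsc : sa.length = score.length := PySem.List.length_sorted score _ _
  have hfd : PySem.Int.floordiv (sd.length : Int) (m' : Int) = ((sd.length / m' : Nat) : Int) :=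
    PySem.Int.floordiv_natCast sd.length m'
  rw [hfd]
  have hA := loopA_eq sd m' hm1 hdesc (sd.length / m') 0 0 (by omega)
  simp only [Nat.cast_zero, zero_add] at hA
  rw [hA]
  rw [show (score.length : Int) = (sa.length : Int) by rw [hlsc]]
  rw [foldB_eq sa m']
  -- reflect B's sum and identify it with A's box-minimum sum
  have hrefl : (∑ j ∈ Finset.range sa.length, if m' ∣ (sa.length - j) then sa.getD j 0 else 0)
      = ∑ i ∈ Finset.range sa.length, if m' ∣ (i + 1) then sd.getD i 0 else 0 := by
    rw [← Finset.sum_range_reflect (fun i => if m' ∣ (i + 1) then sd.getD i 0 else 0) sa.length]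
    apply Finset.sum_congr rfl
    intro j hj
    have hjn : j < sa.length := Finset.mem_range.mp hj
    have h1 : sa.length - 1 - j + 1 = sa.length - j := by omega
    rw [h1]
    by_cases hd : m' ∣ (sa.length - j)
    · rw [if_pos hd, if_pos hd, hrev]
      rw [List.getD_eq_getElem sa 0 (by omega : j < sa.length),
          List.getD_eq_getElem sa.reverse 0 (by simp; omega),
          List.getElem_reverse]
      congr 1
      omega
    · rw [if_neg hd, if_neg hd]
  rw [hrefl, sum_ite_dvd (fun i => sd.getD i 0) sa.length m' hm1, ← hlen,
      listSum_eq_finsetSum]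

-- ===== VERDICT (by name: the statement is the Claim_ definition above) =====
theorem solution_spec : Claim_equal_solution := by
  intro k m score _ hpre
  unfold Spec_solution
  exact solution_eq k m score hpre
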